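-- pv_equiv track=rewrite | github.com/jueonkang/PS | 백준/Silver/24495. Non－Transitive Dice/Non－Transitive Dice.py | beat
-- ===== SOURCE A (Python) =====
-- def beat(d1,d2):
--   count1 = 0
--   count2 = 0
--   for i in d1:
--     for j in d2:
--       if i>j:
--         count1 += 1
--       elif i<j:
--         count2 += 1
--   return count1 > count2
-- ===== SOURCE B (Python) =====
-- def beat(d1, d2):
--     # sort d2 once; for each face of d1 count smaller/greater faces by binary search
--     s = sorted(d2)
--     m = len(s)
--     wins = 0
--     losses = 0
--     for i in d1:
--         # bisect_left: number of faces of d2 strictly below i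
--         lo, hi = 0, m
--         while lo < hi:
--             mid = (lo + hi) // 2
--             if s[mid] < i:
--                 lo = mid + 1
--             else:
--                 hi = mid
--         wins += lo
--         # bisect_right: faces of d2 at most i; the rest are strictly above
--         lo, hi = 0, m
--         while lo < hi:
--             mid = (lo + hi) // 2
--             if i < s[mid]:
--                 hi = mid
--             else:
--                 lo = mid + 1
--         losses += m - lo
--     return wins > losses
-- ===== Notes on version B (the rewrite author's own statement) =====
-- stated objective: faster
-- what changed: Instead of comparing every face of d1 with every face of d2 (nested loops), B sorts d2 once and for each face of d1 binary-searches (bisect_left/bisect_right) the sorted list to count smaller and greater faces.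
import Mathlib
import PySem

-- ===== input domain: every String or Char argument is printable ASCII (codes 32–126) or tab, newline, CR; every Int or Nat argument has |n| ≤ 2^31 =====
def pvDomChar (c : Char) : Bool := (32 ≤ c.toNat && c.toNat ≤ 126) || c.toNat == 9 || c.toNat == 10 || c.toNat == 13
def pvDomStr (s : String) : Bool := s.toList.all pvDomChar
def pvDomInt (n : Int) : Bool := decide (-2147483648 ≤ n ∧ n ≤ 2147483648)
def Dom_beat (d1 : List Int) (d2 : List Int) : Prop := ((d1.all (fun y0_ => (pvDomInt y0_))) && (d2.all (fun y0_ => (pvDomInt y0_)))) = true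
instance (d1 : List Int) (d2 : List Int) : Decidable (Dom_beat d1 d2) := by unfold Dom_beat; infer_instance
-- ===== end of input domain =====

-- B replaces A's all-pairs double loop by sorting d2 once and binary-searching it per face of d1 (objective: faster, asymptotic).

-- ===== PORT A =====
def beat (d1 : List Int) (d2 : List Int) : Bool :=
  let cs := d1.foldl (fun (acc : Int × Int) i =>
    d2.foldl (fun (a : Int × Int) j =>
      if i > j then (a.1 + 1, a.2)
      else if i < j then (a.1, a.2 + 1)
      else a) acc) (0, 0)
  decide (cs.1 > cs.2)

-- ===== PORT B =====
-- Source B's hand-written lo/hi binary-search loops are exactly Python's bisect_left / bisect_right,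
-- which PySem owns as PySem.List.bisectLeft / bisectRight.
def beat_alt (d1 : List Int) (d2 : List Int) : Bool :=
  let s := PySem.List.sorted d2 (fun x => x) false
  let m := s.length
  let cs := d1.foldl (fun (acc : Int × Int) i =>
    (acc.1 + (PySem.List.bisectLeft s i : Int),
     acc.2 + ((m - PySem.List.bisectRight s i : Nat) : Int))) (0, 0)
  decide (cs.1 > cs.2)

-- ===== PRECONDITION & SPEC =====
def Spec_beat (d1 : List Int) (d2 : List Int) (out : Bool) : Prop := out = beat_alt d1 d2
instance (d1 : List Int) (d2 : List Int) (out : Bool) : Decidable (Spec_beat d1 d2 out) := by unfold Spec_beat; infer_instance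

-- ===== CLAIM (what is proved, stated in full; the proofs are below) =====
def Claim_equal_beat : Prop := ∀ (d1 : List Int) (d2 : List Int), Dom_beat d1 d2 → Spec_beat d1 d2 (beat d1 d2)

-- ===== LEMMAS AND PROOFS =====

-- On a list whose first k elements satisfy p and the rest do not, countP p = k.
theorem countP_eq_of_split (p : Int → Bool) :
    ∀ (s : List Int) (k : Nat), k ≤ s.length →
    (∀ (j : Nat) (hj : j < s.length), j < k → p s[j]) →
    (∀ (j : Nat) (hj : j < s.length), k ≤ j → ¬ p s[j]) →
    s.countP p = k := by
  intro s
  induction s with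
  | nil => intro k hk _ _; simp at hk ⊢; omega
  | cons x t ih =>
    intro k hk hlt hge
    cases k with
    | zero =>
      rw [List.countP_eq_zero.mpr]
      intro a ha
      rcases List.mem_iff_getElem.mp ha with ⟨j, hj, rfl⟩
      exact fun hp => hge j hj (Nat.zero_le _) hp
    | succ k' =>
      have hx : p x := hlt 0 (by simp) (Nat.succ_pos _)
      have ht : t.countP p = k' := by
        apply ih k' (by simpa [Nat.succ_le_succ_iff] using hk)
        · intro j hj hjk
          have := hlt (j+1) (by simpa using Nat.succ_lt_succ hj) (Nat.succ_lt_succ hjk)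
          simpa using this
        · intro j hj hjk
          have := hge (j+1) (by simpa using Nat.succ_lt_succ hj) (Nat.succ_le_succ hjk)
          simpa using this
      simp [hx, ht]

theorem bisectLeft_eq_countP (s : List Int) (i : Int)
    (hs : s.Pairwise (· ≤ ·)) :
    PySem.List.bisectLeft s i = s.countP (fun j => decide (j < i)) := by
  obtain ⟨h1, h2, h3⟩ := PySem.List.bisectLeft_spec s i hs
  exact (countP_eq_of_split _ s _ h1
    (fun j hj hjk => by simpa using h2 j hj hjk)
    (fun j hj hjk => by simpa using not_lt.mpr (h3 j hj hjk))).symm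

theorem bisectRight_eq_countP (s : List Int) (i : Int)
    (hs : s.Pairwise (· ≤ ·)) :
    PySem.List.bisectRight s i = s.countP (fun j => decide (j ≤ i)) := by
  obtain ⟨h1, h2, h3⟩ := PySem.List.bisectRight_spec s i hs
  exact (countP_eq_of_split _ s _ h1
    (fun j hj hjk => by simpa using h2 j hj hjk)
    (fun j hj hjk => by simpa using not_le.mpr (h3 j hj hjk))).symm

-- A's inner loop over d2 adds (countP (< i), countP (> i)) to the accumulator.
theorem inner_fold_eq (i : Int) :
    ∀ (d2 : List Int) (a : Int × Int),
    d2.foldl (fun (a : Int × Int) j =>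
      if i > j then (a.1 + 1, a.2)
      else if i < j then (a.1, a.2 + 1)
      else a) a
    = (a.1 + d2.countP (fun j => decide (j < i)), a.2 + d2.countP (fun j => decide (i < j))) := by
  intro d2
  induction d2 with
  | nil => intro a; simp
  | cons x t ih =>
    intro a
    by_cases h1 : i > x
    · simp [List.foldl_cons, h1, not_lt.mpr (le_of_lt h1), ih]
      ring_nf
    · by_cases h2 : i < x
      · simp [List.foldl_cons, h1, h2, ih]
        ring_nf
      · simp [List.foldl_cons, h1, h2, ih]

-- Both outer folds have the shape "add (f i, g i) per element"; their value is a pair of sums.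
theorem pair_fold_eq (f g : Int → Int) :
    ∀ (l : List Int) (a : Int × Int),
    l.foldl (fun (a : Int × Int) i => (a.1 + f i, a.2 + g i)) a
    = (a.1 + (l.map f).sum, a.2 + (l.map g).sum) := by
  intro l
  induction l with
  | nil => intro a; simp
  | cons x t ih => intro a; simp [List.foldl_cons, ih]; constructor <;> ring

theorem length_sub_countP_le (s : List Int) (i : Int) :
    s.length - s.countP (fun j => decide (j ≤ i)) = s.countP (fun j => decide (i < j)) := by
  have h := List.length_eq_countP_add_countP (l := s) (p := fun j => decide (j ≤ i))
  have hc : s.countP (fun a => decide (¬ decide (a ≤ i) = true)) = s.countP (fun j => decide (i < j)) :=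
    List.countP_congr (fun a _ => by simp [not_le])
  rw [hc] at h
  omega

-- ===== VERDICT (by name: the statement is the Claim_ definition above) =====
theorem beat_spec : Claim_equal_beat := by
  intro d1 d2 _
  unfold Spec_beat beat beat_alt
  have hs : (PySem.List.sorted d2 (fun x => x) false).Pairwise (· ≤ ·) :=
    PySem.List.sorted_pairwise d2 (fun x => x)
  have hperm : (PySem.List.sorted d2 (fun x => x) false).Perm d2 :=
    PySem.List.sorted_perm d2 (fun x => x) false
  have hstep : (fun (acc : Int × Int) i =>
      d2.foldl (fun (a : Int × Int) j =>
        if i > j then (a.1 + 1, a.2)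
        else if i < j then (a.1, a.2 + 1)
        else a) acc)
      = (fun (acc : Int × Int) i =>
        (acc.1 + (d2.countP (fun j => decide (j < i)) : Int),
         acc.2 + (d2.countP (fun j => decide (i < j)) : Int))) := by
    funext acc i; exact inner_fold_eq i d2 acc
  have hstep' : (fun (acc : Int × Int) i =>
      (acc.1 + (PySem.List.bisectLeft (PySem.List.sorted d2 (fun x => x) false) i : Int),
       acc.2 + (((PySem.List.sorted d2 (fun x => x) false).length
                 - PySem.List.bisectRight (PySem.List.sorted d2 (fun x => x) false) i : Nat) : Int)))
      = (fun (acc : Int × Int) i =>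
        (acc.1 + (d2.countP (fun j => decide (j < i)) : Int),
         acc.2 + (d2.countP (fun j => decide (i < j)) : Int))) := by
    funext acc i
    rw [bisectLeft_eq_countP _ i hs, bisectRight_eq_countP _ i hs,
        length_sub_countP_le, hperm.countP_eq, hperm.countP_eq]
  simp only [hstep, hstep',
    pair_fold_eq (fun i => (d2.countP (fun j => decide (j < i)) : Int))
                 (fun i => (d2.countP (fun j => decide (i < j)) : Int)) d1 (0, 0)]
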